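-- pv_equiv track=rewrite | github.com/DansiDanutz/ZmartBot | zmart-api/dashboard/MDC-Dashboard-Port8090/server.py | _are_service_variants
-- ===== SOURCE A (Python) =====
-- def _are_service_variants(name1: str, name2: str) -> bool:
--     """Check if two service names are variants of the same service"""
--     name1_lower = name1.lower().replace('-', '_').replace(' ', '_')
--     name2_lower = name2.lower().replace('-', '_').replace(' ', '_')
--
--     # Common service variant patterns
--     variant_patterns = [
--         ('_service', ''),
--         ('_agent', ''),
--         ('_manager', ''),
--         ('_api', ''),
--         ('_server', ''),
--         ('_daemon', ''),
--         ('_worker', ''),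
--         ('_handler', ''),
--         ('_controller', ''),
--         ('_processor', '')
--     ]
--
--     for pattern, replacement in variant_patterns:
--         if name1_lower.endswith(pattern) and name2_lower == name1_lower.replace(pattern, replacement):
--             return True
--         if name2_lower.endswith(pattern) and name1_lower == name2_lower.replace(pattern, replacement):
--             return True
--
--     return False
-- ===== SOURCE B (Python) =====
-- _SUFFIX_TOKENS = {'service', 'agent', 'manager', 'api', 'server', 'daemon',
--                   'worker', 'handler', 'controller', 'processor'}
--
--
-- def _normalize(name):
--     return name.lower().replace('-', '_').replace(' ', '_')
--
--
-- def _base(name):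
--     """The unique candidate base of a normalized name, or None.
--
--     No suffix pattern is a suffix of another, so a name can end with at most
--     one of them, and it does iff its last '_'-separated segment is one of the
--     suffix tokens.  If so, remove '_'+token everywhere (str.replace, matching
--     the replace-all behaviour), else there is no candidate base.
--     """
--     _head, sep, tail = name.rpartition('_')
--     if sep and tail in _SUFFIX_TOKENS:
--         return name.replace('_' + tail, '')
--     return None
--
--
-- def _are_service_variants(name1: str, name2: str) -> bool:
--     n1 = _normalize(name1)
--     n2 = _normalize(name2)
--     return n2 == _base(n1) or n1 == _base(n2)
-- ===== Notes on version B (the rewrite author's own statement) =====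
-- stated objective: alternative
-- what changed: Instead of looping over the ten suffix patterns testing endswith in both directions, B rpartitions each name at its last '_', looks the final segment up in a set of suffix tokens to obtain the single candidate base (valid since no pattern is a suffix of another), and compares the two names against each other's base.
import Mathlib
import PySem

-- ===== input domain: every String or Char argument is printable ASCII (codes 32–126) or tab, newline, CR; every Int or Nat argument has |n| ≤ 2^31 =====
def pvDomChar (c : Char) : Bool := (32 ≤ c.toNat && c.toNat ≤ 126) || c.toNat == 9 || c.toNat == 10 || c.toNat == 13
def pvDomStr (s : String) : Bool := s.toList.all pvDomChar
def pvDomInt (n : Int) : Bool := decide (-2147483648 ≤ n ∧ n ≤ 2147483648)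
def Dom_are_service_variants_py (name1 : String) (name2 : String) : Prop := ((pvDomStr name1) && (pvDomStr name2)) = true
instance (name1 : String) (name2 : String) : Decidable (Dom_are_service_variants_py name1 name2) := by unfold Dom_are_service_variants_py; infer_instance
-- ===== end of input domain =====

-- B replaces A's loop over the ten patterns by direct dispatch: rpartition the name at its last '_',
-- look the final segment up in a set of suffix tokens, and compare with the single candidate base (simpler decomposition).


-- ===== PORT A =====
def pvVariantPatterns : List (String × String) :=
  [("_service", ""), ("_agent", ""), ("_manager", ""), ("_api", ""), ("_server", ""),
   ("_daemon", ""), ("_worker", ""), ("_handler", ""), ("_controller", ""), ("_processor", "")]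

def pvNormalize (name : String) : String :=
  PySem.Str.replace (PySem.Str.replace (PySem.Str.lower name) "-" "_") " " "_"

-- A's for-loop with its two early returns
def pvALoop (n1 n2 : String) : List (String × String) → Bool
  | [] => false
  | (pattern, replacement) :: rest =>
    if PySem.Str.endswith n1 pattern && (n2 == PySem.Str.replace n1 pattern replacement) then true
    else if PySem.Str.endswith n2 pattern && (n1 == PySem.Str.replace n2 pattern replacement) then true
    else pvALoop n1 n2 rest

def are_service_variants_py (name1 : String) (name2 : String) : Bool :=
  let name1_lower := pvNormalize name1
  let name2_lower := pvNormalize name2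
  pvALoop name1_lower name2_lower pvVariantPatterns

-- ===== PORT B =====
-- the Python set literal _SUFFIX_TOKENS (distinct elements)
def pvSuffixTokens : List (List Char) :=
  ["service".toList, "agent".toList, "manager".toList, "api".toList, "server".toList,
   "daemon".toList, "worker".toList, "handler".toList, "controller".toList, "processor".toList]

-- Source B's _base. `name.rpartition('_')` is ported by hand (exact for a single-char
-- separator): tail = the characters after the last '_', sep is nonempty iff '_' occurs.
def pvBaseL (n : List Char) : Option (List Char) :=
  -- tail := the segment after the last '_' (inlined below)
  if n.contains '_' && pvSuffixTokens.contains ((n.reverse.takeWhile (fun c => c != '_')).reverse) then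
    some (PySem.Chars.replace n ('_' :: (n.reverse.takeWhile (fun c => c != '_')).reverse) [])
  else none

def are_service_variants_py_alt (name1 : String) (name2 : String) : Bool :=
  let n1 := (pvNormalize name1).toList
  let n2 := (pvNormalize name2).toList
  (pvBaseL n1 == some n2) || (pvBaseL n2 == some n1)

-- ===== PRECONDITION & SPEC =====
def Spec_are_service_variants_py (name1 : String) (name2 : String) (out : Bool) : Prop := out = are_service_variants_py_alt name1 name2
instance (name1 : String) (name2 : String) (out : Bool) : Decidable (Spec_are_service_variants_py name1 name2 out) := by unfold Spec_are_service_variants_py; infer_instance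

-- ===== CLAIM (what is proved, stated in full; the proofs are below) =====
def Claim_equal_are_service_variants_py : Prop := ∀ (name1 : String) (name2 : String), Dom_are_service_variants_py name1 name2 → Spec_are_service_variants_py name1 name2 (are_service_variants_py name1 name2)

-- ===== LEMMAS AND PROOFS =====

-- a string ends with '_'::t (t without '_') iff '_' occurs in it and t is the segment after the last '_'
theorem endswith_underscore_iff (n t : List Char) (ht : '_' ∉ t) :
    PySem.Chars.endswith n ('_' :: t) = true
    ↔ n.contains '_' = true ∧ (n.reverse.takeWhile (fun c => c != '_')).reverse = t := by
  rw [PySem.Chars.endswith_iff]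
  constructor
  · rintro ⟨pre, rfl⟩
    refine ⟨by simp, ?_⟩
    have hself : t.reverse.takeWhile (fun c => c != '_') = t.reverse :=
      List.takeWhile_eq_self_iff.mpr (by
        intro x hx
        simp only [bne_iff_ne, ne_eq]
        exact fun hEq => ht (by simpa [hEq] using List.mem_reverse.mp hx))
    have h1 : (t.reverse ++ ['_']).takeWhile (fun c => c != '_') = t.reverse := by
      rw [List.takeWhile_append, if_pos (by rw [hself])]
      simp
    rw [List.reverse_append, List.reverse_cons, List.takeWhile_append]
    rw [if_neg (by rw [h1]; simp), h1]
    simp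
  · rintro ⟨hc, htl⟩
    have htk : n.reverse.takeWhile (fun c => c != '_') = t.reverse := by
      have := congrArg List.reverse htl
      simpa using this
    have hsplit := List.takeWhile_append_dropWhile (p := fun c => c != '_') (l := n.reverse)
    rcases hd : n.reverse.dropWhile (fun c => c != '_') with _ | ⟨d, ds⟩
    · exfalso
      have hn : n.reverse = t.reverse := by rw [← hsplit, htk, hd, List.append_nil]
      have hmem : '_' ∈ n := List.contains_iff_mem.mp hc
      have : '_' ∈ t.reverse := by rw [← hn]; simpa using hmem
      exact ht (List.mem_reverse.mp this)
    · have hdval : d = '_' := by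
        have := List.head_dropWhile_not (fun c => c != '_') (l := n.reverse) (by rw [hd]; simp)
        simp [hd] at this
        exact this
      have hn : n.reverse = t.reverse ++ '_' :: ds := by
        rw [← hsplit, htk, hd, hdval]
      refine ⟨ds.reverse, ?_⟩
      have := congrArg List.reverse hn
      simpa using this.symm

-- one firing pattern forces B's base to be exactly m (t = the pattern without its leading '_')
theorem forward_pat (s m p : String) (t : List Char) (hp : p.toList = '_' :: t) (ht : '_' ∉ t)
    (htok : pvSuffixTokens.contains t = true)
    (hend : PySem.Str.endswith s p = true) (hmeq : m = PySem.Str.replace s p "") :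
    pvBaseL s.toList = some m.toList := by
  rw [PySem.Str.endswith_eq, hp] at hend
  obtain ⟨hc, htl⟩ := (endswith_underscore_iff _ _ ht).mp hend
  have hm2 : m.toList = PySem.Chars.replace s.toList ('_' :: t) [] := by
    rw [hmeq]
    rw [show (PySem.Str.replace s p "").toList
        = PySem.Chars.replace s.toList p.toList "".toList from by simp]
    rw [hp]
    simp
  unfold pvBaseL
  rw [htl, if_pos (by rw [Bool.and_eq_true]; exact ⟨hc, htok⟩), hm2]

-- conversely, B's base being m exhibits the firing pattern
theorem backward_pat (s m p : String) (t : List Char) (hp : p.toList = '_' :: t) (ht : '_' ∉ t)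
    (hpv : (p, "") ∈ pvVariantPatterns)
    (hc : s.toList.contains '_' = true)
    (htl : (s.toList.reverse.takeWhile (fun c => c != '_')).reverse = t)
    (hm : m.toList = PySem.Chars.replace s.toList ('_' :: t) []) :
    ∃ x ∈ pvVariantPatterns, PySem.Str.endswith s x.1 = true ∧ m = PySem.Str.replace s x.1 x.2 := by
  refine ⟨(p, ""), hpv, ?_, ?_⟩
  · rw [PySem.Str.endswith_eq, hp]
    exact (endswith_underscore_iff _ _ ht).mpr ⟨hc, htl⟩
  · rw [← String.toList_inj]
    rw [show (PySem.Str.replace s p "").toList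
        = PySem.Chars.replace s.toList p.toList "".toList from by simp]
    rw [hm, hp]
    simp

-- one direction of A's disjunction, as B computes it
theorem dir_eq (s m : String) :
    pvVariantPatterns.any
      (fun pr => PySem.Str.endswith s pr.1 && (m == PySem.Str.replace s pr.1 pr.2))
    = (pvBaseL s.toList == some m.toList) := by
  rw [Bool.eq_iff_iff]
  simp only [List.any_eq_true, Bool.and_eq_true, beq_iff_eq]
  constructor
  · rintro ⟨pr, hpr, hend, hmeq⟩
    simp only [pvVariantPatterns, List.mem_cons, List.not_mem_nil, or_false] at hpr
    rcases hpr with rfl | rfl | rfl | rfl | rfl | rfl | rfl | rfl | rfl | rfl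
    · exact forward_pat s m _ "service".toList (by decide) (by decide) (by decide) hend hmeq
    · exact forward_pat s m _ "agent".toList (by decide) (by decide) (by decide) hend hmeq
    · exact forward_pat s m _ "manager".toList (by decide) (by decide) (by decide) hend hmeq
    · exact forward_pat s m _ "api".toList (by decide) (by decide) (by decide) hend hmeq
    · exact forward_pat s m _ "server".toList (by decide) (by decide) (by decide) hend hmeq
    · exact forward_pat s m _ "daemon".toList (by decide) (by decide) (by decide) hend hmeq
    · exact forward_pat s m _ "worker".toList (by decide) (by decide) (by decide) hend hmeq
    · exact forward_pat s m _ "handler".toList (by decide) (by decide) (by decide) hend hmeq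
    · exact forward_pat s m _ "controller".toList (by decide) (by decide) (by decide) hend hmeq
    · exact forward_pat s m _ "processor".toList (by decide) (by decide) (by decide) hend hmeq
  · intro h
    unfold pvBaseL at h
    split at h
    case isFalse => exact absurd h (by simp)
    case isTrue hcond =>
      rw [Bool.and_eq_true] at hcond
      obtain ⟨hc, htok⟩ := hcond
      have hm : m.toList
          = PySem.Chars.replace s.toList
              ('_' :: (s.toList.reverse.takeWhile (fun c => c != '_')).reverse) [] :=
        (Option.some.inj h).symm
      have hmem := List.contains_iff_mem.mp htok
      simp only [pvSuffixTokens, List.mem_cons, List.not_mem_nil, or_false] at hmem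
      rcases hmem with htl | htl | htl | htl | htl | htl | htl | htl | htl | htl
      · rw [htl] at hm
        exact backward_pat s m "_service" "service".toList (by decide) (by decide) (by decide) hc htl hm
      · rw [htl] at hm
        exact backward_pat s m "_agent" "agent".toList (by decide) (by decide) (by decide) hc htl hm
      · rw [htl] at hm
        exact backward_pat s m "_manager" "manager".toList (by decide) (by decide) (by decide) hc htl hm
      · rw [htl] at hm
        exact backward_pat s m "_api" "api".toList (by decide) (by decide) (by decide) hc htl hm
      · rw [htl] at hm
        exact backward_pat s m "_server" "server".toList (by decide) (by decide) (by decide) hc htl hm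
      · rw [htl] at hm
        exact backward_pat s m "_daemon" "daemon".toList (by decide) (by decide) (by decide) hc htl hm
      · rw [htl] at hm
        exact backward_pat s m "_worker" "worker".toList (by decide) (by decide) (by decide) hc htl hm
      · rw [htl] at hm
        exact backward_pat s m "_handler" "handler".toList (by decide) (by decide) (by decide) hc htl hm
      · rw [htl] at hm
        exact backward_pat s m "_controller" "controller".toList (by decide) (by decide) (by decide) hc htl hm
      · rw [htl] at hm
        exact backward_pat s m "_processor" "processor".toList (by decide) (by decide) (by decide) hc htl hm

-- A's loop returns true iff some pattern fires in either direction
theorem pvALoop_eq_any (n1 n2 : String) (l : List (String × String)) :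
    pvALoop n1 n2 l
    = (l.any (fun pr => PySem.Str.endswith n1 pr.1 && (n2 == PySem.Str.replace n1 pr.1 pr.2))
       || l.any (fun pr => PySem.Str.endswith n2 pr.1 && (n1 == PySem.Str.replace n2 pr.1 pr.2))) := by
  induction l with
  | nil => rfl
  | cons pr rest ih =>
    obtain ⟨p, r⟩ := pr
    show (if PySem.Str.endswith n1 p && (n2 == PySem.Str.replace n1 p r) then true
          else if PySem.Str.endswith n2 p && (n1 == PySem.Str.replace n2 p r) then true
          else pvALoop n1 n2 rest) = _
    rw [List.any_cons, List.any_cons, ih]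
    cases h1 : (PySem.Str.endswith n1 p && (n2 == PySem.Str.replace n1 p r)) <;>
      cases h2 : (PySem.Str.endswith n2 p && (n1 == PySem.Str.replace n2 p r)) <;>
        simp

-- ===== VERDICT (by name: the statement is the Claim_ definition above) =====
theorem are_service_variants_py_spec : Claim_equal_are_service_variants_py := by
  intro name1 name2 _
  unfold Spec_are_service_variants_py are_service_variants_py are_service_variants_py_alt
  show pvALoop (pvNormalize name1) (pvNormalize name2) pvVariantPatterns
      = ((pvBaseL (pvNormalize name1).toList == some (pvNormalize name2).toList)
         || (pvBaseL (pvNormalize name2).toList == some (pvNormalize name1).toList))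
  rw [pvALoop_eq_any, dir_eq, dir_eq]
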